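-- pv_equiv track=rewrite | github.com/bakkim05/IA_Proyecto_4 | Code/main.py | padres_madres
-- ===== SOURCE A (Python) =====
-- def padres_madres(pobla, errs):
--     mejores1 = []
--     mejores2 = []
--
--     n = len(pobla)
--
--     cont = 1
--
--     for i in range(n):
--         if (cont % 2) ==  1:
--             ind = pos(errs)
--             mejores1.append(pobla.pop(ind))
--             errs.pop(ind)
--             cont += 1
--         elif (cont % 2) == 0:
--             ind = pos(errs)
--             mejores2.append(pobla.pop(ind))
--             errs.pop(ind)
--             cont += 1
--
--     return mejores1, mejores2
--
-- def pos(lista):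
--     temp = lista[0]
--     sub = 0
--
--     for i in range(len(lista)):
--         if lista[i] < temp:
--             temp = lista[i]
--             sub = i
--     return sub
-- ===== SOURCE B (Python) =====
-- def padres_madres(pobla, errs):
--     # sort indices by (error, position): stable ascending-error order,
--     # then deal the population out alternately in one pass
--     order = sorted(range(len(errs)), key=lambda i: (errs[i], i))
--     mejores1 = []
--     mejores2 = []
--     for k, i in enumerate(order):
--         if k % 2 == 0:
--             mejores1.append(pobla[i])
--         else:
--             mejores2.append(pobla[i])
--     return mejores1, mejores2
-- ===== Notes on version B (the rewrite author's own statement) =====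
-- stated objective: faster
-- what changed: A repeatedly scans the remaining errors for the first minimum and pops both lists n times; B sorts the indices once by (error, position) and deals the population out alternately in a single pass. Pre_ restricts to equally long pobla and errs (the parallel-list calling convention): on mismatched lengths A either raises or returns values picked through indices of a differently-shrinking errs list, an artefact no caller could rely on.
-- outside the precondition, e.g. on padres_madres([1, 2], [5, 0, 9]): A returns ([2], [1]), B raises IndexError; on padres_madres([], [1]): A returns ([], []), B raises IndexError
import Mathlib
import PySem

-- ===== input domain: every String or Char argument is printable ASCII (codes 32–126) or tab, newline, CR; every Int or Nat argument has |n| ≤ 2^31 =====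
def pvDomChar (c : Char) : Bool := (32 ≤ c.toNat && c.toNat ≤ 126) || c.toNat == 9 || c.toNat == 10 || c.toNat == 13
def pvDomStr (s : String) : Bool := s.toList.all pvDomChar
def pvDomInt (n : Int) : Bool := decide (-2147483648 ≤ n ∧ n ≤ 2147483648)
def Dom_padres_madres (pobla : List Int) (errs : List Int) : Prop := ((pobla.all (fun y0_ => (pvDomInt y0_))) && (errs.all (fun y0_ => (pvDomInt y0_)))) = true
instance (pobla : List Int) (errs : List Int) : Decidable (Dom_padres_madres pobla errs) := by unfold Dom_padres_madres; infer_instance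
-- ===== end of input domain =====

-- B replaces A's n repeated argmin scans + pops by one stable (error, position) index
-- sort followed by a single alternating distribution pass (objective: faster).
-- NOTE on side effects: Python A empties the caller's pobla and errs lists in place;
-- B does not mutate its arguments. The equivalence proved here is about the RETURN value only.

-- ===== PORT A =====
-- pos(lista): running first-argmin scan (lista[0] raises IndexError on empty — outside Pre_)
def pos (lista : List Int) : Int :=
  (((PySem.List.pyRange 0 (PySem.List.len lista) 1).foldl
    (fun (st : Int × Int) i =>
      if PySem.List.pyGetD lista i 0 < st.1 then (PySem.List.pyGetD lista i 0, i) else st)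
    (PySem.List.pyGetD lista 0 0, 0))).2

-- the 'for i in range(n)' loop of A; state = (pobla, errs, mejores1, mejores2, cont);
-- a failing pop (Python IndexError, outside Pre_) stops with the current state
def pmLoopA : Nat → List Int × List Int × List Int × List Int × Int →
    List Int × List Int × List Int × List Int × Int
  | 0, st => st
  | k+1, (po, er, m1, m2, cont) =>
    if PySem.Int.mod cont 2 = 1 then
      match PySem.List.pop? po (pos er), PySem.List.pop? er (pos er) with
      | some (v, po'), some (_, er') => pmLoopA k (po', er', m1 ++ [v], m2, cont + 1)
      | _, _ => (po, er, m1, m2, cont)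
    else if PySem.Int.mod cont 2 = 0 then
      match PySem.List.pop? po (pos er), PySem.List.pop? er (pos er) with
      | some (v, po'), some (_, er') => pmLoopA k (po', er', m1, m2 ++ [v], cont + 1)
      | _, _ => (po, er, m1, m2, cont)
    else pmLoopA k (po, er, m1, m2, cont)

def padres_madres (pobla : List Int) (errs : List Int) : List Int × List Int :=
  let st := pmLoopA pobla.length (pobla, errs, [], [], 1)
  (st.2.2.1, st.2.2.2.1)

-- ===== PORT B =====
def padres_madres_alt (pobla : List Int) (errs : List Int) : List Int × List Int :=
  let order := PySem.List.sorted (PySem.List.pyRange 0 (PySem.List.len errs) 1)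
      (fun i => toLex (PySem.List.pyGetD errs i 0, i)) false
  (PySem.List.enumerate order 0).foldl
      (fun (st : List Int × List Int) ki =>
        if PySem.Int.mod ki.1 2 = 0 then (st.1 ++ [PySem.List.pyGetD pobla ki.2 0], st.2)
        else (st.1, st.2 ++ [PySem.List.pyGetD pobla ki.2 0])) ([], [])

-- ===== PRECONDITION & SPEC =====
-- Pre_ restricts to equally long pobla and errs (the parallel-list calling convention):
-- on mismatched lengths A either raises IndexError or returns values picked through
-- indices of a differently-shrinking errs list, an artefact no caller could rely on.
def Pre_padres_madres (pobla : List Int) (errs : List Int) : Prop := pobla.length = errs.length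
instance (pobla : List Int) (errs : List Int) : Decidable (Pre_padres_madres pobla errs) := by
  unfold Pre_padres_madres; infer_instance
def pvWitness_padres_madres : List Int × List Int := ([1, 2, 3], [3, 1, 2])

def Spec_padres_madres (pobla : List Int) (errs : List Int) (out : List Int × List Int) : Prop :=
  out = padres_madres_alt pobla errs
instance (pobla : List Int) (errs : List Int) (out : List Int × List Int) :
    Decidable (Spec_padres_madres pobla errs out) := by unfold Spec_padres_madres; infer_instance

-- ===== CLAIM (what is proved, stated in full; the proofs are below) =====
def Claim_equal_padres_madres : Prop := ∀ (pobla : List Int) (errs : List Int),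
  Dom_padres_madres pobla errs → Pre_padres_madres pobla errs →
  Spec_padres_madres pobla errs (padres_madres pobla errs)
-- ===== LEMMAS AND PROOFS =====

-- abbreviations used only by the proofs
def pmKey (errs : List Int) (i : Int) : Int := PySem.List.pyGetD errs i 0
def pmGetP (pobla : List Int) (i : Int) : Int := PySem.List.pyGetD pobla i 0
def pmLex (errs : List Int) (i : Int) : Int ×ₗ Int := toLex (pmKey errs i, i)

-- Nat-indexed version of pos, convenient for reasoning
def posN (l : List Int) : Nat :=
  (((List.range l.length).foldl (fun (st : Int × Nat) i =>
    if l.getD i 0 < st.1 then (l.getD i 0, i) else st) (l.getD 0 0, 0))).2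

-- the selection sequence: original indices extracted by A, in extraction order
def pmSel (errs : List Int) : Nat → List Int → List Int
  | 0, _ => []
  | _+1, [] => []
  | k+1, x :: t =>
    let p := posN ((x :: t).map (pmKey errs))
    (x :: t).getD p 0 :: pmSel errs k ((x :: t).eraseIdx p)

-- alternating distribution of a list into two lists
def pmDeal : List Int → List Int × List Int
  | [] => ([], [])
  | x :: xs => ((x :: (pmDeal xs).2), (pmDeal xs).1)

lemma pos_fold_aux (l : List Int) (ns : List Nat) : ∀ (t : Int) (s : Nat),
    ns.foldl (fun (st : Int × Int) i =>
      if l.getD i 0 < st.1 then (l.getD i 0, (i : Int)) else st) (t, (s : Int)) =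
    ((ns.foldl (fun (st : Int × Nat) i =>
      if l.getD i 0 < st.1 then (l.getD i 0, i) else st) (t, s)).1,
     ((ns.foldl (fun (st : Int × Nat) i =>
      if l.getD i 0 < st.1 then (l.getD i 0, i) else st) (t, s)).2 : Int)) := by
  induction ns with
  | nil => intro t s; simp
  | cons n ns ih =>
    intro t s
    simp only [List.foldl_cons]
    by_cases h : l.getD n 0 < t
    · simp only [h, if_pos]; exact ih _ n
    · simp only [h, if_neg, not_false_iff]; exact ih t s

lemma pos_eq_posN (l : List Int) : pos l = (posN l : Int) := by
  unfold pos posN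
  rw [PySem.List.len_eq, PySem.List.pyRange_zero_natCast, List.foldl_map]
  simp only [PySem.List.pyGetD_natCast, PySem.List.pyGetD_zero]
  have h := pos_fold_aux l (List.range l.length) (l.getD 0 0) 0
  push_cast at h
  rw [h]

lemma posN_inv (l : List Int) (h : l ≠ []) : ∀ (k : Nat), k ≤ l.length →
    let st := (List.range k).foldl (fun (st : Int × Nat) i =>
      if l.getD i 0 < st.1 then (l.getD i 0, i) else st) (l.getD 0 0, 0)
    st.2 < l.length ∧ st.1 = l.getD st.2 0 ∧
    (∀ q, q < k → st.1 ≤ l.getD q 0) ∧ (∀ q, q < st.2 → st.1 < l.getD q 0) := by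
  intro k
  induction k with
  | zero =>
    intro _
    refine ⟨by simpa using List.length_pos_of_ne_nil h, by simp, by omega, by simp⟩
  | succ k ih =>
    intro hk
    have ihh := ih (by omega)
    simp only [List.range_succ, List.foldl_append, List.foldl_cons, List.foldl_nil]
    set st := (List.range k).foldl (fun (st : Int × Nat) i =>
      if l.getD i 0 < st.1 then (l.getD i 0, i) else st) (l.getD 0 0, 0) with hst
    obtain ⟨h1, h2, h3, h4⟩ := ihh
    by_cases hc : l.getD k 0 < st.1
    · simp only [hc, if_pos]
      refine ⟨by omega, by simp, ?_, ?_⟩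
      · intro q hq
        rcases Nat.lt_succ_iff_lt_or_eq.mp hq with hq | hq
        · exact le_of_lt (lt_of_lt_of_le hc (h3 q hq))
        · simp [hq]
      · intro q hq; exact lt_of_lt_of_le hc (h3 q hq)
    · simp only [hc, if_neg, not_false_iff]
      refine ⟨h1, h2, ?_, h4⟩
      intro q hq
      rcases Nat.lt_succ_iff_lt_or_eq.mp hq with hq | hq
      · exact h3 q hq
      · subst hq; omega

lemma posN_spec (l : List Int) (h : l ≠ []) :
    posN l < l.length ∧ (∀ q, q < l.length → l.getD (posN l) 0 ≤ l.getD q 0) ∧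
    (∀ q, q < posN l → l.getD (posN l) 0 < l.getD q 0) := by
  have := posN_inv l h l.length (le_refl _)
  obtain ⟨h1, h2, h3, h4⟩ := this
  unfold posN
  exact ⟨h1, fun q hq => h2 ▸ h3 q hq, fun q hq => h2 ▸ h4 q hq⟩

lemma pmSel_poslt (errs : List Int) (x : Int) (t : List Int) :
    posN ((x :: t).map (pmKey errs)) < (x :: t).length := by
  have h := (posN_spec ((x :: t).map (pmKey errs)) (by simp)).1
  simpa using h

lemma pmSel_perm (errs : List Int) : ∀ (k : Nat) (L : List Int), L.length = k →
    (pmSel errs k L).Perm L := by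
  intro k
  induction k with
  | zero => intro L hL; rw [List.length_eq_zero_iff] at hL; subst hL; simp [pmSel]
  | succ k ih =>
    intro L hL
    match L with
    | x :: t =>
      rw [pmSel]
      set p := posN ((x :: t).map (pmKey errs)) with hp
      have hplt : p < (x :: t).length := pmSel_poslt errs x t
      have hlen : ((x :: t).eraseIdx p).length = k := by
        rw [List.length_eraseIdx_of_lt hplt]; simpa using hL
      have hperm := ih ((x :: t).eraseIdx p) hlen
      have h2 : ((x :: t)[p] :: (x :: t).eraseIdx p).Perm (x :: t) :=
        List.getElem_cons_eraseIdx_perm hplt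
      rw [List.getD_eq_getElem _ _ hplt]
      exact (hperm.cons _).trans h2

-- every member of eraseIdx p sits at an original position other than p
lemma mem_eraseIdx_ne (L : List Int) (p : Nat) (hp : p < L.length)
    (j : Int) (hj : j ∈ L.eraseIdx p) : ∃ q, ∃ (hq : q < L.length), q ≠ p ∧ L[q] = j := by
  obtain ⟨q, hq, hval⟩ := List.mem_iff_getElem.mp hj
  rw [List.getElem_eraseIdx] at hval
  split at hval
  · exact ⟨q, by omega, by omega, hval⟩
  · have : q + 1 < L.length := by
      have := hq; rw [List.length_eraseIdx_of_lt hp] at this; omega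
    exact ⟨q + 1, this, by omega, hval⟩

-- the first argmin of the errors is the strict (error, position) lex minimum
lemma pmSel_head_lt (errs : List Int) (L : List Int) (hne : L ≠ [])
    (hL : L.Pairwise (· < ·)) :
    ∀ j ∈ L.eraseIdx (posN (L.map (pmKey errs))),
      pmLex errs (L.getD (posN (L.map (pmKey errs))) 0) < pmLex errs j := by
  set p := posN (L.map (pmKey errs)) with hpdef
  have hmne : L.map (pmKey errs) ≠ [] := by simpa using hne
  obtain ⟨hplt', hmin, hfirst⟩ := posN_spec (L.map (pmKey errs)) hmne
  have hplt : p < L.length := by simpa using hplt'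
  intro j hj
  obtain ⟨q, hq, hqp, hval⟩ := mem_eraseIdx_ne L p hplt j hj
  rw [List.getD_eq_getElem _ _ hplt]
  subst hval
  have hkey : ∀ (r : Nat) (hr : r < L.length),
      (L.map (pmKey errs)).getD r 0 = pmKey errs L[r] := by
    intro r hr
    rw [List.getD_eq_getElem _ _ (by simpa using hr)]
    simp
  have hle : pmKey errs L[p] ≤ pmKey errs L[q] := by
    have := hmin q (by simpa using hq)
    rwa [hkey p hplt, hkey q hq] at this
  rcases lt_or_eq_of_le hle with hlt | heq
  · exact Prod.Lex.toLex_lt_toLex.mpr (Or.inl (by simpa using hlt))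
  · have hpq : p < q := by
      rcases Nat.lt_or_ge q p with hqlt | hge
      · have := hfirst q (by simpa using hqlt)
        rw [hkey p hplt, hkey q hq] at this; omega
      · omega
    have : L[p] < L[q] := List.pairwise_iff_getElem.mp hL p q hplt hq hpq
    exact Prod.Lex.toLex_lt_toLex.mpr (Or.inr ⟨by simpa using heq, by simpa using this⟩)

lemma pmSel_pairwise (errs : List Int) : ∀ (k : Nat) (L : List Int), L.length = k →
    L.Pairwise (· < ·) →
    (pmSel errs k L).Pairwise (fun a b => pmLex errs a < pmLex errs b) := by
  intro k
  induction k with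
  | zero => intro L hL _; rw [List.length_eq_zero_iff] at hL; subst hL; simp [pmSel]
  | succ k ih =>
    intro L hL hpw
    match L with
    | x :: t =>
      rw [pmSel]
      set p := posN ((x :: t).map (pmKey errs)) with hp
      have hplt : p < (x :: t).length := pmSel_poslt errs x t
      have hlen : ((x :: t).eraseIdx p).length = k := by
        rw [List.length_eraseIdx_of_lt hplt]; simpa using hL
      have hpw' : ((x :: t).eraseIdx p).Pairwise (· < ·) :=
        hpw.sublist (List.eraseIdx_sublist _ _)
      refine List.Pairwise.cons ?_ (ih _ hlen hpw')
      intro j hj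
      have hjmem : j ∈ (x :: t).eraseIdx p :=
        (pmSel_perm errs k _ hlen).mem_iff.mp hj
      exact pmSel_head_lt errs (x :: t) (by simp) hpw j hjmem

lemma loopA_eq (pobla errs : List Int) : ∀ (k : Nat) (L : List Int)
    (m1 m2 : List Int) (cont : Int), L.length = k → L.Pairwise (· < ·) →
    pmLoopA k (L.map (pmGetP pobla), L.map (pmKey errs), m1, m2, cont) =
      ([], [],
       (if PySem.Int.mod cont 2 = 1
        then m1 ++ (pmDeal ((pmSel errs k L).map (pmGetP pobla))).1
        else m1 ++ (pmDeal ((pmSel errs k L).map (pmGetP pobla))).2),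
       (if PySem.Int.mod cont 2 = 1
        then m2 ++ (pmDeal ((pmSel errs k L).map (pmGetP pobla))).2
        else m2 ++ (pmDeal ((pmSel errs k L).map (pmGetP pobla))).1),
       cont + k) := by
  intro k
  induction k with
  | zero =>
    intro L m1 m2 cont hL _
    rw [List.length_eq_zero_iff] at hL; subst hL
    simp [pmLoopA, pmSel, pmDeal]
  | succ k ih =>
    intro L m1 m2 cont hL hpw
    match L with
    | x :: t =>
      set p := posN ((x :: t).map (pmKey errs)) with hpdef
      have hplt : p < (x :: t).length := pmSel_poslt errs x t
      have hlen' : ((x :: t).eraseIdx p).length = k := by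
        rw [List.length_eraseIdx_of_lt hplt]; simpa using hL
      have hpw' : ((x :: t).eraseIdx p).Pairwise (· < ·) :=
        hpw.sublist (List.eraseIdx_sublist _ _)
      have hpos : pos ((x :: t).map (pmKey errs)) = (p : Int) := pos_eq_posN _
      have hplt1 : p < ((x :: t).map (pmGetP pobla)).length := by simpa using hplt
      have hplt2 : p < ((x :: t).map (pmKey errs)).length := by simpa using hplt
      have hsel : pmSel errs (k+1) (x :: t) =
          (x :: t)[p] :: pmSel errs k ((x :: t).eraseIdx p) := by
        rw [pmSel, List.getD_eq_getElem _ _ hplt]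
      have hm2 : PySem.Int.mod cont 2 = cont % 2 :=
        PySem.Int.mod_eq_emod_of_pos (by norm_num)
      have hm2' : PySem.Int.mod (cont + 1) 2 = (cont + 1) % 2 :=
        PySem.Int.mod_eq_emod_of_pos (by norm_num)
      simp only [pmLoopA, hpos,
        PySem.List.pop?_natCast _ p hplt1, PySem.List.pop?_natCast _ p hplt2,
        List.eraseIdx_map, List.getElem_map]
      rcases Int.emod_two_eq_zero_or_one cont with hpar | hpar
      · rw [hm2, hpar]
        norm_num
        rw [ih _ _ _ _ hlen' hpw', hm2']
        have : (cont + 1) % 2 = 1 := by omega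
        rw [this, hsel]
        simp only [pmDeal, List.map_cons, if_true, List.append_assoc,
          List.singleton_append]
        simp
        ring
      · rw [hm2, hpar]
        norm_num
        rw [ih _ _ _ _ hlen' hpw', hm2']
        have : (cont + 1) % 2 = 0 := by omega
        rw [this, hsel]
        simp only [pmDeal, List.map_cons, List.append_assoc, List.singleton_append]
        push_cast
        simp
        ring

lemma loopB_eq (pobla : List Int) : ∀ (l : List Int) (m1 m2 : List Int) (k : Int),
    (PySem.List.enumerate l k).foldl
      (fun (st : List Int × List Int) ki =>
        if PySem.Int.mod ki.1 2 = 0 then (st.1 ++ [PySem.List.pyGetD pobla ki.2 0], st.2)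
        else (st.1, st.2 ++ [PySem.List.pyGetD pobla ki.2 0])) (m1, m2) =
      (if PySem.Int.mod k 2 = 0
       then (m1 ++ (pmDeal (l.map (pmGetP pobla))).1, m2 ++ (pmDeal (l.map (pmGetP pobla))).2)
       else (m1 ++ (pmDeal (l.map (pmGetP pobla))).2, m2 ++ (pmDeal (l.map (pmGetP pobla))).1)) := by
  intro l
  induction l with
  | nil => intro m1 m2 k; simp [PySem.List.enumerate, pmDeal]
  | cons x xs ih =>
    intro m1 m2 k
    rw [PySem.List.enumerate_cons]
    have hm : PySem.Int.mod k 2 = k % 2 := PySem.Int.mod_eq_emod_of_pos (by norm_num)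
    have hm' : PySem.Int.mod (k + 1) 2 = (k + 1) % 2 := PySem.Int.mod_eq_emod_of_pos (by norm_num)
    simp only [List.foldl_cons]
    rcases Int.emod_two_eq_zero_or_one k with hpar | hpar
    · rw [hm, hpar]
      rw [if_pos rfl]
      rw [ih _ _ (k+1), hm']
      have h1 : (k + 1) % 2 = 1 := by omega
      rw [h1, if_neg (by norm_num)]
      simp [pmDeal, pmGetP, List.append_assoc]
    · rw [hm, hpar]
      rw [if_neg (by norm_num)]
      rw [ih _ _ (k+1), hm']
      have h0 : (k + 1) % 2 = 0 := by omega
      rw [h0, if_pos rfl]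
      simp [pmDeal, pmGetP, List.append_assoc]

lemma pm_main (pobla errs : List Int) (hpre : pobla.length = errs.length) :
    padres_madres pobla errs = padres_madres_alt pobla errs := by
  set L0 := PySem.List.pyRange 0 (PySem.List.len pobla) 1 with hL0
  have hlen : PySem.List.len errs = PySem.List.len pobla := by
    simp [PySem.List.len_eq, hpre]
  have hL0len : L0.length = pobla.length := by
    rw [hL0, PySem.List.len_eq, PySem.List.pyRange_zero_natCast]; simp
  have hL0pw : L0.Pairwise (· < ·) := by
    rw [hL0, PySem.List.len_eq, PySem.List.pyRange_zero_natCast]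
    refine (List.pairwise_map).mpr ?_
    exact List.pairwise_lt_range.imp (fun {a b} h => by exact_mod_cast h)
  have hmapP : L0.map (pmGetP pobla) = pobla := by
    simpa [pmGetP] using PySem.List.map_pyGetD_pyRange_zero pobla 0
  have hmapE : L0.map (pmKey errs) = errs := by
    have := PySem.List.map_pyGetD_pyRange_zero errs 0
    rw [hlen] at this
    simpa [pmKey] using this
  have horder : PySem.List.sorted L0 (pmLex errs) false = pmSel errs pobla.length L0 :=
    PySem.List.sorted_eq_of_perm_of_pairwise_lt L0 _ (pmLex errs)
      (pmSel_perm errs _ L0 hL0len) (pmSel_pairwise errs _ L0 hL0len hL0pw)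
  have key := loopA_eq pobla errs pobla.length L0 [] [] 1 hL0len hL0pw
  rw [hmapP, hmapE] at key
  have hA : padres_madres pobla errs =
      ((pmDeal ((pmSel errs pobla.length L0).map (pmGetP pobla))).1,
       (pmDeal ((pmSel errs pobla.length L0).map (pmGetP pobla))).2) := by
    show ((pmLoopA pobla.length (pobla, errs, [], [], 1)).2.2.1,
          (pmLoopA pobla.length (pobla, errs, [], [], 1)).2.2.2.1) = _
    rw [key]
    simp
  have hB : padres_madres_alt pobla errs =
      ((pmDeal ((pmSel errs pobla.length L0).map (pmGetP pobla))).1,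
       (pmDeal ((pmSel errs pobla.length L0).map (pmGetP pobla))).2) := by
    show (PySem.List.enumerate (PySem.List.sorted (PySem.List.pyRange 0 (PySem.List.len errs) 1)
        (fun i => toLex (PySem.List.pyGetD errs i 0, i)) false) 0).foldl _ ([], []) = _
    have hkey : (fun i => toLex (PySem.List.pyGetD errs i 0, i)) = pmLex errs := by
      funext i; simp [pmLex, pmKey]
    rw [hlen, hkey, horder, loopB_eq pobla _ [] [] 0]
    simp
  rw [hA, hB]

-- ===== VERDICT (by name: the statement is the Claim_ definition above) =====
theorem padres_madres_spec : Claim_equal_padres_madres := by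
  intro pobla errs _ hpre
  unfold Spec_padres_madres
  exact pm_main pobla errs hpre
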